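-- pv_equiv track=rewrite | github.com/Yoriichi17/JITHACK-2024 | Stenov4_GUI_Final/quantum_stenography.py | stega_encoder
-- ===== SOURCE A (Python) =====
-- def stega_encoder(LM, carrier_msg):
--     message = ""
--     i = 0
--     for bitstring in LM:
--         for digit in bitstring:
--             while i < len(carrier_msg) and not carrier_msg[i].isalpha():
--                 message += carrier_msg[i]
--                 i += 1
--             if i < len(carrier_msg):
--                 if digit == "1":
--                     message += carrier_msg[i].upper()
--                 else:
--                     message += carrier_msg[i]
--                 i += 1
--     if i < len(carrier_msg):
--         message += carrier_msg[i:]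
--     return message
-- ===== SOURCE B (Python) =====
-- def stega_encoder(LM, carrier_msg):
--     bits = "".join(LM)
--     n = len(bits)
--     j = 0
--     out = []
--     for ch in carrier_msg:
--         if j == n:
--             out.append(ch)
--         elif not ch.isalpha():
--             out.append(ch)
--         else:
--             out.append(ch.upper() if bits[j] == "1" else ch)
--             j += 1
--     return "".join(out)
-- ===== Notes on version B (the rewrite author's own statement) =====
-- stated objective: faster
-- what changed: Flattens the bitstrings once and makes a single pass over the carrier with a bit cursor appending to a list, replacing A's bit-driven nested loops with inner non-alpha skip, tail slice and quadratic string concatenation.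
import Mathlib
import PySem

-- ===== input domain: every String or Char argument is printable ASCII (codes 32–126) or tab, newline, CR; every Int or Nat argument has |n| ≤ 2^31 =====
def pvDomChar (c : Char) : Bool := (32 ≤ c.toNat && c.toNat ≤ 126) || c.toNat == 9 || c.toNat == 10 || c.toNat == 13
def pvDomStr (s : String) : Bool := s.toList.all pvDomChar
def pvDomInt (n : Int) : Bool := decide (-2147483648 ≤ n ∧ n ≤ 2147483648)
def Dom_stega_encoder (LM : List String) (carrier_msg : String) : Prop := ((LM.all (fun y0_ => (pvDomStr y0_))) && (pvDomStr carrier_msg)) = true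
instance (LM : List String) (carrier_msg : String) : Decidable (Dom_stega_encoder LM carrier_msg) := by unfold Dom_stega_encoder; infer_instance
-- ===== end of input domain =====

-- B flattens the bits once and makes one pass over the carrier with a bit cursor,
-- replacing A's bit-driven nested loops (with inner non-alpha skip and tail slice); objective: simpler.

-- ===== PORT A =====
-- the inner `while i < len(carrier_msg) and not carrier_msg[i].isalpha()` loop:
-- state is (message so far, remaining carrier carrier_msg[i:])
def stegaSkipA : List Char → List Char → (List Char × List Char)
  | acc, [] => (acc, [])
  | acc, c :: rest =>
      if ¬ PySem.Chars.isalpha c then stegaSkipA (acc ++ [c]) rest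
      else (acc, c :: rest)

-- body of the `for digit in bitstring` loop
def stegaStepA (st : List Char × List Char) (digit : Char) : List Char × List Char :=
  let (acc, rest) := stegaSkipA st.1 st.2
  match rest with
  | [] => (acc, [])
  | c :: rs =>
      if digit = '1' then (acc ++ [PySem.Chars.upperChar c], rs)
      else (acc ++ [c], rs)

def stega_encoder (LM : List String) (carrier_msg : String) : String :=
  let st := LM.foldl (fun st bitstring => bitstring.toList.foldl stegaStepA st)
              ([], carrier_msg.toList)
  -- `if i < len(carrier_msg): message += carrier_msg[i:]`
  String.mk (st.1 ++ st.2)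

-- ===== PORT B =====
-- one pass over the carrier, consuming the flattened bits
def stegaGoB : List Char → List Char → List Char
  | [], _ => []
  | c :: cs, [] => c :: stegaGoB cs []
  | c :: cs, b :: bs =>
      if ¬ PySem.Chars.isalpha c then c :: stegaGoB cs (b :: bs)
      else (if b = '1' then PySem.Chars.upperChar c else c) :: stegaGoB cs bs

def stega_encoder_alt (LM : List String) (carrier_msg : String) : String :=
  let bits := (LM.map String.toList).flatten   -- bits = "".join(LM)
  String.mk (stegaGoB carrier_msg.toList bits)

-- ===== PRECONDITION & SPEC =====
def Spec_stega_encoder (LM : List String) (carrier_msg : String) (out : String) : Prop := out = stega_encoder_alt LM carrier_msg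
instance (LM : List String) (carrier_msg : String) (out : String) : Decidable (Spec_stega_encoder LM carrier_msg out) := by unfold Spec_stega_encoder; infer_instance

-- ===== CLAIM (what is proved, stated in full; the proofs are below) =====
def Claim_equal_stega_encoder : Prop := ∀ (LM : List String) (carrier_msg : String), Dom_stega_encoder LM carrier_msg → Spec_stega_encoder LM carrier_msg (stega_encoder LM carrier_msg)

-- ===== LEMMAS AND PROOFS =====

theorem stegaGoB_nil (cs : List Char) : stegaGoB cs [] = cs := by
  induction cs with
  | nil => rfl
  | cons c cs ih => simp [stegaGoB, ih]

theorem foldl_stepA_nilrest (ds : List Char) (acc : List Char) :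
    ds.foldl stegaStepA (acc, []) = (acc, []) := by
  induction ds with
  | nil => rfl
  | cons d ds ih => simpa [stegaStepA, stegaSkipA] using ih

theorem foldl_stepA_eq_goB (rest : List Char) :
    ∀ (ds acc : List Char),
      (ds.foldl stegaStepA (acc, rest)).1 ++ (ds.foldl stegaStepA (acc, rest)).2
        = acc ++ stegaGoB rest ds := by
  induction rest with
  | nil =>
      intro ds acc
      cases ds with
      | nil => rfl
      | cons d ds =>
          rw [List.foldl_cons, show stegaStepA (acc, []) d = (acc, []) from rfl,
            foldl_stepA_nilrest]
          simp [stegaGoB]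
  | cons c rs ih =>
      intro ds acc
      cases ds with
      | nil => simp [stegaGoB, stegaGoB_nil]
      | cons d ds =>
          by_cases h : PySem.Chars.isalpha c
          · have hstep : stegaStepA (acc, c :: rs) d =
                (acc ++ [if d = '1' then PySem.Chars.upperChar c else c], rs) := by
              simp [stegaStepA, stegaSkipA, h]
              split <;> simp
            rw [List.foldl_cons, hstep]
            simpa [stegaGoB, h] using ih ds (acc ++ [if d = '1' then PySem.Chars.upperChar c else c])
          · have hstep : stegaStepA (acc, c :: rs) d = stegaStepA (acc ++ [c], rs) d := by
              simp [stegaStepA, stegaSkipA, h]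
            rw [List.foldl_cons, hstep, ← List.foldl_cons]
            simpa [stegaGoB, h] using ih (d :: ds) (acc ++ [c])

theorem foldl_over_strings (LM : List String) (st : List Char × List Char) :
    LM.foldl (fun st bitstring => bitstring.toList.foldl stegaStepA st) st
      = ((LM.map String.toList).flatten).foldl stegaStepA st := by
  induction LM generalizing st with
  | nil => rfl
  | cons s LM ih => simp [List.foldl_append, ih]

-- ===== VERDICT (by name: the statement is the Claim_ definition above) =====
theorem stega_encoder_spec : Claim_equal_stega_encoder := by
  intro LM carrier_msg _
  unfold Spec_stega_encoder stega_encoder stega_encoder_alt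
  simp only [foldl_over_strings, foldl_stepA_eq_goB, List.nil_append]
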